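-- pv_equiv track=rewrite | github.com/LeonAck/NRP_similarity_constraints | Code/Metaheuristic/leon_thesis/invoke/Solutions/initial_solution.py | collect_stretches
-- ===== SOURCE A (Python) =====
-- import itertools
--
-- def collect_stretches(check_object):
--     stretch_object_employee = {}
--     start_index = 0
--     # get lists of consecutive working days
--     for k, v in itertools.groupby(check_object):
--         len_stretch = sum(1 for _ in v)
--         if k:
--             # save in dict under start index with end index
--             work_stretch = {}
--             work_stretch["end_index"] = start_index + len_stretch - 1
--             work_stretch["length"] = len_stretch
--             stretch_object_employee[start_index] = work_stretch
--             start_index += len_stretch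
--         else:
--             start_index += len_stretch
--
--     return stretch_object_employee
-- ===== SOURCE B (Python) =====
-- def collect_stretches(check_object):
--     n = len(check_object)
--     # stage 1: boundary indices where a new run begins
--     starts = [i for i in range(n) if i == 0 or check_object[i] != check_object[i - 1]]
--     bounds = starts + [n]
--     # stage 2: pair each run start with the next boundary
--     return {s: {"end_index": e - 1, "length": e - s}
--             for s, e in zip(bounds, bounds[1:]) if check_object[s]}
-- ===== Notes on version B (the rewrite author's own statement) =====
-- stated objective: alternative
-- what changed: Instead of streaming over groupby groups with a running start counter, B first builds the list of run-boundary indices by comparing each position with its predecessor, appends the length as a final bound, and then pairs adjacent boundaries to emit an entry for each truthy run.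
import Mathlib
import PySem

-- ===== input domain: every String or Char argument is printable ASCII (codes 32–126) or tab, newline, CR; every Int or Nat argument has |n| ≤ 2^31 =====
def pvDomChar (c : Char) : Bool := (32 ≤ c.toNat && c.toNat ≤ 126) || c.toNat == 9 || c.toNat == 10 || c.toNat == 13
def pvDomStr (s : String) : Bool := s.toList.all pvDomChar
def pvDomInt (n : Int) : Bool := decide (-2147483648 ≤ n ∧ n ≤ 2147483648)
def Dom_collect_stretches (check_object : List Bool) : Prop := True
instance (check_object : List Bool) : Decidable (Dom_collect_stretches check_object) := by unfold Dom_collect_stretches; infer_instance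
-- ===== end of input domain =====

-- B builds the list of run-boundary indices first and then pairs adjacent boundaries,
-- instead of A's one streaming pass over groupby groups (alternative decomposition).

-- ===== PORT A =====
-- itertools.groupby(check_object): consecutive runs as (key, run length)
def pyRuns : List Bool → List (Bool × Nat)
  | [] => []
  | x :: xs => (x, (xs.takeWhile (· == x)).length + 1) :: pyRuns (xs.dropWhile (· == x))
termination_by l => l.length
decreasing_by simp; exact List.length_dropWhile_le _ _

-- one iteration of A's for-loop; dict keys (start indices) are strictly increasing, so
-- each dict assignment is a fresh-key insert = append at the end (insertion order)
def stepA (st : List (Int × List (String × Int)) × Int) (g : Bool × Nat) :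
    List (Int × List (String × Int)) × Int :=
  if g.1 then
    (st.1 ++ [(st.2, [("end_index", st.2 + (g.2 : Int) - 1), ("length", (g.2 : Int))])],
     st.2 + (g.2 : Int))
  else (st.1, st.2 + (g.2 : Int))

def collect_stretches (check_object : List Bool) : List (Int × List (String × Int)) :=
  ((pyRuns check_object).foldl stepA ([], 0)).1

-- ===== PORT B =====
-- the comprehension's condition: i == 0 or check_object[i] != check_object[i-1]
def bCond (xs : List Bool) (i : Nat) : Bool :=
  i == 0 || xs.getD i false != xs.getD (i - 1) false

-- starts = [i for i in range(n) if i == 0 or check_object[i] != check_object[i-1]]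
def bStarts (xs : List Bool) : List Nat := (List.range xs.length).filter (bCond xs)

-- the dict comprehension's per-pair function (with its 'if check_object[s]' guard)
def bEntry (xs : List Bool) (se : Nat × Nat) : Option (Int × List (String × Int)) :=
  if xs.getD se.1 false then
    some ((se.1 : Int), [("end_index", (se.2 : Int) - 1),
                         ("length", (se.2 : Int) - (se.1 : Int))])
  else none

def collect_stretches_alt (check_object : List Bool) : List (Int × List (String × Int)) :=
  let bounds := bStarts check_object ++ [check_object.length]
  (bounds.zip bounds.tail).filterMap (bEntry check_object)

-- ===== PRECONDITION & SPEC =====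
def Spec_collect_stretches (check_object : List Bool) (out : List (Int × List (String × Int))) : Prop := out = collect_stretches_alt check_object
instance (check_object : List Bool) (out : List (Int × List (String × Int))) : Decidable (Spec_collect_stretches check_object out) := by unfold Spec_collect_stretches; infer_instance

-- ===== CLAIM (what is proved, stated in full; the proofs are below) =====
def Claim_equal_collect_stretches : Prop := ∀ (check_object : List Bool), Dom_collect_stretches check_object → Spec_collect_stretches check_object (collect_stretches check_object)

-- ===== LEMMAS AND PROOFS =====

def shiftEntry (s : Int) (e : Int × List (String × Int)) : Int × List (String × Int) :=
  (e.1 + s, e.2.map (fun nv => (nv.1, if nv.1 == "end_index" then nv.2 + s else nv.2)))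

lemma shiftEntry_zero (e : Int × List (String × Int)) : shiftEntry 0 e = e := by
  cases e with
  | mk a b => simp [shiftEntry]

lemma shiftEntry_comp (s l : Int) (e : Int × List (String × Int)) :
    shiftEntry s (shiftEntry l e) = shiftEntry (s + l) e := by
  cases e with
  | mk a b =>
    simp [shiftEntry, List.map_map]
    refine ⟨by ring, ?_⟩
    intro nm v _
    by_cases h : nm = "end_index"
    · simp [h]; ring
    · simp [h]

-- B characterization, stage 1: the starts of a run decomposition
lemma bStarts_decomp (l : Nat) (hl : 1 ≤ l) (p : Bool) (ys : List Bool)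
    (h : ∀ y ∈ ys.head?, y ≠ p) :
    bStarts (List.replicate l p ++ ys) = 0 :: (bStarts ys).map (l + ·) := by
  obtain ⟨k, rfl⟩ : ∃ k, l = k + 1 := ⟨l - 1, by omega⟩
  unfold bStarts
  have hlen : (List.replicate (k + 1) p ++ ys).length = (k + 1) + ys.length := by simp
  rw [hlen, List.range_add, List.filter_append, List.range_succ_eq_map,
    List.filter_cons_of_pos (by simp [bCond]), List.filter_map, List.filter_map]
  have h1 : (List.range k).filter (bCond (List.replicate (k + 1) p ++ ys) ∘ Nat.succ) = [] := by
    rw [List.filter_eq_nil_iff]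
    intro i hi
    have hik : i < k := List.mem_range.mp hi
    have g1 : (List.replicate (k + 1) p ++ ys).getD (i + 1) false = p := by
      rw [List.getD_append _ _ _ _ (by simp; omega), List.getD_replicate p (by omega)]
    have g2 : (List.replicate (k + 1) p ++ ys).getD (i + 1 - 1) false = p := by
      rw [List.getD_append _ _ _ _ (by simp; omega), List.getD_replicate p (by omega)]
    simp only [Function.comp_apply, bCond, Nat.succ_eq_add_one]
    rw [g1, g2]
    simp
  have h2 : (List.range ys.length).filter (bCond (List.replicate (k + 1) p ++ ys) ∘
      (fun x => (k + 1) + x)) = (List.range ys.length).filter (bCond ys) := by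
    apply List.filter_congr
    intro i hi
    have him : i < ys.length := List.mem_range.mp hi
    have g1 : (List.replicate (k + 1) p ++ ys).getD ((k + 1) + i) false = ys.getD i false := by
      rw [List.getD_append_right _ _ _ _ (by simp)]
      simp
    cases i with
    | zero =>
      obtain ⟨y, t, rfl⟩ : ∃ y t, ys = y :: t := by
        cases ys with
        | nil => simp at him
        | cons y t => exact ⟨y, t, rfl⟩
      have hyp : y ≠ p := h y (by simp)
      have g2 : (List.replicate (k + 1) p ++ y :: t).getD ((k + 1) + 0 - 1) false = p := by
        rw [List.getD_append _ _ _ _ (by simp), List.getD_replicate p (by omega)]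
      simp only [Function.comp_apply, bCond]
      rw [g1, g2]
      simp [hyp]
    | succ j =>
      have g2 : (List.replicate (k + 1) p ++ ys).getD ((k + 1) + (j + 1) - 1) false
          = ys.getD (j + 1 - 1) false := by
        rw [List.getD_append_right _ _ _ _ (by simp)]
        simp
      simp only [Function.comp_apply, bCond]
      rw [g1, g2]
      simp
  rw [h1, h2]
  simp

-- B characterization, stage 2: the whole output of a run decomposition
lemma alt_decomp (l : Nat) (hl : 1 ≤ l) (p : Bool) (ys : List Bool)
    (h : ∀ y ∈ ys.head?, y ≠ p) :
    collect_stretches_alt (List.replicate l p ++ ys) =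
      (if p then [((0 : Int), [("end_index", (l : Int) - 1), ("length", (l : Int))])]
       else []) ++ (collect_stretches_alt ys).map (shiftEntry l) := by
  have hB0 : ∃ r, bStarts ys ++ [ys.length] = 0 :: r := by
    cases ys with
    | nil => exact ⟨[], rfl⟩
    | cons y t =>
      unfold bStarts
      rw [List.length_cons, List.range_succ_eq_map,
        List.filter_cons_of_pos (by simp [bCond])]
      exact ⟨_, rfl⟩
  obtain ⟨r, hr⟩ := hB0

  unfold collect_stretches_alt
  rw [bStarts_decomp l hl p ys h]
  have hlen : (List.replicate l p ++ ys).length = l + ys.length := by simp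
  have hb : (0 :: (bStarts ys).map (l + ·)) ++ [(List.replicate l p ++ ys).length]
      = 0 :: ((bStarts ys ++ [ys.length]).map (l + ·)) := by
    rw [hlen]; simp
  simp only [hb, hr, List.tail_cons]
  have hzip : (0 :: List.map (l + ·) (0 :: r)).zip (List.map (l + ·) (0 :: r))
      = (0, l + 0) :: List.map (Prod.map (l + ·) (l + ·)) ((0 :: r).zip r) := by
    rw [List.map_cons, List.zip_cons_cons]
    congr 1
    rw [← List.zip_map]
    rfl
  rw [hzip, List.filterMap_cons]
  have hg0 : (List.replicate l p ++ ys).getD 0 false = p := by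
    rw [List.getD_append _ _ _ _ (by simp; omega), List.getD_replicate p (by omega)]
  have hpt : ∀ se : Nat × Nat,
      bEntry (List.replicate l p ++ ys) (Prod.map (l + ·) (l + ·) se)
        = Option.map (shiftEntry (l : Int)) (bEntry ys se) := by
    intro ⟨a, b⟩
    have hga : (List.replicate l p ++ ys).getD (l + a) false = ys.getD a false := by
      rw [List.getD_append_right _ _ _ _ (by simp)]; simp
    simp only [bEntry, Prod.map, hga]
    split
    · simp [shiftEntry]
      exact ⟨by ring, by ring⟩
    · rfl
  have htail : List.filterMap (bEntry (List.replicate l p ++ ys))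
        (List.map (Prod.map (l + ·) (l + ·)) ((0 :: r).zip r))
      = List.map (shiftEntry (l : Int)) (List.filterMap (bEntry ys) ((0 :: r).zip r)) := by
    rw [List.filterMap_map, List.map_filterMap]
    exact List.filterMap_congr (fun se _ => hpt se)
  rw [htail]
  have hhead : bEntry (List.replicate l p ++ ys) (0, l + 0)
      = if p then some ((0 : Int), [("end_index", (l : Int) - 1), ("length", (l : Int))])
        else none := by
    simp only [bEntry, hg0]
    split <;> simp
  rw [hhead]
  cases p <;> simp

-- A's fold over the runs of ys, started at (d, s), appends B's result shifted by s
lemma main_inv (ys : List Bool) (d : List (Int × List (String × Int))) (s : Int) :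
    ((pyRuns ys).foldl stepA (d, s)).1 =
      d ++ (collect_stretches_alt ys).map (shiftEntry s) := by
  induction ys using pyRuns.induct generalizing d s with
  | case1 =>
    rw [pyRuns]
    simp [collect_stretches_alt, bStarts]
  | case2 x xs ih =>
    have hrep : x :: xs = List.replicate ((xs.takeWhile (· == x)).length + 1) x
        ++ xs.dropWhile (· == x) := by
      conv_lhs => rw [show xs = xs.takeWhile (· == x) ++ xs.dropWhile (· == x) from
        (List.takeWhile_append_dropWhile).symm]
      rw [List.replicate_succ, List.cons_append]
      congr 1
      have htw : xs.takeWhile (· == x)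
          = List.replicate (xs.takeWhile (· == x)).length x :=
        List.eq_replicate_iff.mpr
          ⟨rfl, fun b hb => by simpa using List.mem_takeWhile_imp hb⟩
      exact congrArg (· ++ xs.dropWhile (· == x)) htw
    have hhead : ∀ y ∈ (xs.dropWhile (· == x)).head?, y ≠ x := by
      intro y hy
      have hd := List.head?_dropWhile_not (· == x) xs
      rw [Option.mem_def] at hy
      rw [hy] at hd
      simpa using hd
    rw [pyRuns, List.foldl_cons]
    conv_rhs => rw [hrep]
    rw [alt_decomp _ (by omega) x _ hhead, List.map_append, List.map_map]
    have hcomp : List.map (shiftEntry s ∘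
            shiftEntry ((((xs.takeWhile (· == x)).length + 1 : ℕ) : ℤ)))
          (collect_stretches_alt (xs.dropWhile (· == x)))
        = List.map (shiftEntry (s + (((xs.takeWhile (· == x)).length + 1 : ℕ) : ℤ)))
          (collect_stretches_alt (xs.dropWhile (· == x))) :=
      List.map_congr_left (fun e _ => shiftEntry_comp _ _ e)
    rw [hcomp]
    cases x with
    | false =>
      rw [show stepA (d, s) (false, (xs.takeWhile (· == false)).length + 1)
          = (d, s + ((xs.takeWhile (· == false)).length + 1 : Nat)) from by
        simp [stepA]]
      rw [ih]
      simp
    | true =>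
      rw [show stepA (d, s) (true, (xs.takeWhile (· == true)).length + 1)
          = (d ++ [(s, [("end_index", s + ((xs.takeWhile (· == true)).length + 1 : Nat) - 1),
              ("length", ((xs.takeWhile (· == true)).length + 1 : Nat))])],
             s + ((xs.takeWhile (· == true)).length + 1 : Nat)) from by
        simp [stepA]]
      rw [ih]
      simp [shiftEntry]
      ring

-- ===== VERDICT (by name: the statement is the Claim_ definition above) =====
theorem collect_stretches_spec : Claim_equal_collect_stretches := by
  intro co _
  unfold Spec_collect_stretches collect_stretches
  rw [main_inv]
  have h : List.map (shiftEntry 0) (collect_stretches_alt co)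
      = List.map id (collect_stretches_alt co) :=
    List.map_congr_left (fun e _ => shiftEntry_zero e)
  simp [h]
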